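-- pv_equiv track=rewrite | github.com/ShengtianSang/SemaTyP | utils/data_process.py | examine_existance_of_drug_disease_path_in_KG
-- ===== SOURCE A (Python) =====
-- def examine_existance_of_drug_disease_path_in_KG(KG,drug,disease):
--     if drug not in KG or disease not in KG:
--         return False
--     else:
--         if disease in KG[drug]["OBJECTS"]:
--             return True
--         for entity in KG[drug]["OBJECTS"]:
--             if entity in KG:
--                 if disease in KG[entity]["OBJECTS"]:
--                     return True
--         for entity_1 in KG[drug]["OBJECTS"]:
--             if entity_1 in KG:
--                 for entity_2 in KG[entity_1]["OBJECTS"]: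
--                     if entity_2 in KG:
--                         if disease in KG[entity_2]["OBJECTS"]:
--                             return True
--         for entity_1 in KG[drug]["OBJECTS"]:
--             if entity_1 in KG:
--                 for entity_2 in KG[entity_1]["OBJECTS"]:
--                     if entity_2 in KG:
--                         for entity_3 in KG[entity_2]["OBJECTS"]:
--                             if entity_3 in KG:
--                                 if disease in KG[entity_3]["OBJECTS"]:
--                                     return True
--     return False
-- ===== SOURCE B (Python) =====
-- def examine_existance_of_drug_disease_path_in_KG(KG, drug, disease):
--     # Depth-limited BFS (4 levels) with a visited set.
--     if drug not in KG or disease not in KG: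
--         return False
--     frontier = [drug]
--     visited = {drug}
--     for _ in range(4):
--         if any(disease in KG[n]["OBJECTS"] for n in frontier):
--             return True
--         nxt = []
--         for n in frontier:
--             for nb in KG[n]["OBJECTS"]:
--                 if nb in KG and nb not in visited:
--                     visited.add(nb)
--                     nxt.append(nb)
--         frontier = nxt
--     return False
-- ===== Notes on version B (the rewrite author's own statement) =====
-- stated objective: alternative
-- what changed: Replaces A's three hard-coded nested enumerations of every 1-4 hop walk with a depth-limited (4 level) BFS over a frontier plus a visited set, so each KG node is expanded at most once.
-- outside the precondition, e.g. on examine_existance_of_drug_disease_path_in_KG({'x': {'OBJECTS': []}, 'd': {}}, 'x', 'x'): A returns False, B returns False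
import Mathlib
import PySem

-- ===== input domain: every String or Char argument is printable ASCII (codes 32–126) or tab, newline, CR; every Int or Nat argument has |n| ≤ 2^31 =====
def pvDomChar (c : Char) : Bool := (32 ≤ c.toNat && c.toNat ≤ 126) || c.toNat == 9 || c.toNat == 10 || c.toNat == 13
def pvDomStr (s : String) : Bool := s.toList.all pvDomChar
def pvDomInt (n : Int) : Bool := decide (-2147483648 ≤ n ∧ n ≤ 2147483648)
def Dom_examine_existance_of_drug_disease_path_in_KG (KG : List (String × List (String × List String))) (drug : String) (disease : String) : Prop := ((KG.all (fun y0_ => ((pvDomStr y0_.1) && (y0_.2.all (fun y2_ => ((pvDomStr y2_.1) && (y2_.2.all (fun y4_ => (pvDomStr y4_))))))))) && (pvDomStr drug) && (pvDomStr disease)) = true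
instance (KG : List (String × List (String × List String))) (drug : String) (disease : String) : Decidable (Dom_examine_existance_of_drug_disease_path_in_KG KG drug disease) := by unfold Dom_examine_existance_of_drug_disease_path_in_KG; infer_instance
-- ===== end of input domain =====

-- B replaces A's hard-coded enumeration of every 1-4 hop walk by a depth-limited BFS with a
-- visited set (objective: alternative — a different algorithm; each KG node is expanded at most once).

-- ===== PORT A =====
-- shared accessors (both Pythons perform exactly these dict lookups):
-- `x in KG` (dict key membership, first match)
def pvMem (KG : List (String × List (String × List String))) (x : String) : Bool :=
  (KG.lookup x).isSome
-- `KG[x]["OBJECTS"]`; total via getD [] — inputs where Python would raise KeyError are outside Pre_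
def pvObjs (KG : List (String × List (String × List String))) (x : String) : List String :=
  match KG.lookup x with
  | none => []
  | some d => (d.lookup "OBJECTS").getD []

def examine_existance_of_drug_disease_path_in_KG (KG : List (String × List (String × List String))) (drug : String) (disease : String) : Bool :=
  if !(pvMem KG drug) || !(pvMem KG disease) then false
  else if (pvObjs KG drug).contains disease then true
  else if (pvObjs KG drug).any (fun e =>
            pvMem KG e && (pvObjs KG e).contains disease) then true
  else if (pvObjs KG drug).any (fun e1 =>
            pvMem KG e1 && (pvObjs KG e1).any (fun e2 =>
              pvMem KG e2 && (pvObjs KG e2).contains disease)) then true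
  else if (pvObjs KG drug).any (fun e1 =>
            pvMem KG e1 && (pvObjs KG e1).any (fun e2 =>
              pvMem KG e2 && (pvObjs KG e2).any (fun e3 =>
                pvMem KG e3 && (pvObjs KG e3).contains disease))) then true
  else false

-- ===== PORT B =====
-- one BFS round: expand every frontier node, appending unvisited KG-member neighbours
def pvExpand (KG : List (String × List (String × List String))) (frontier : List String)
    (visited : PySem.Set String) : List String × PySem.Set String :=
  frontier.foldl (fun acc n =>
    (pvObjs KG n).foldl (fun acc2 nb =>
      if pvMem KG nb && !(PySem.Set.contains acc2.2 nb) then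
        (acc2.1 ++ [nb], PySem.Set.add acc2.2 nb)
      else acc2) acc) ([], visited)

def pvBfs (KG : List (String × List (String × List String))) (disease : String) :
    Nat → List String → PySem.Set String → Bool
  | 0, _, _ => false
  | Nat.succ fuel, frontier, visited =>
    if frontier.any (fun n => (pvObjs KG n).contains disease) then true
    else
      let fv := pvExpand KG frontier visited
      pvBfs KG disease fuel fv.1 fv.2

def examine_existance_of_drug_disease_path_in_KG_alt (KG : List (String × List (String × List String))) (drug : String) (disease : String) : Bool :=
  if !(pvMem KG drug) || !(pvMem KG disease) then false
  else pvBfs KG disease 4 [drug] (PySem.Set.ofList [drug])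

-- ===== PRECONDITION & SPEC =====
-- Pre_ excludes KGs containing an entry without the "OBJECTS" key while both drug and disease
-- are keys of KG: A raises KeyError as soon as such an entry is consulted during its walk, and
-- whether it is consulted is path-dependent, so the whole shape is excluded.
def Pre_examine_existance_of_drug_disease_path_in_KG (KG : List (String × List (String × List String))) (drug : String) (disease : String) : Prop :=
  (KG.lookup drug).isSome = true → (KG.lookup disease).isSome = true →
    ∀ p ∈ KG, (p.2.lookup "OBJECTS").isSome = true
instance (KG : List (String × List (String × List String))) (drug : String) (disease : String) : Decidable (Pre_examine_existance_of_drug_disease_path_in_KG KG drug disease) := by unfold Pre_examine_existance_of_drug_disease_path_in_KG; infer_instance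

def pvWitness_examine_existance_of_drug_disease_path_in_KG : (List (String × List (String × List String))) × String × String :=
  ([("a", [("OBJECTS", ["b"])]), ("b", [("OBJECTS", [])])], "a", "b")

def Spec_examine_existance_of_drug_disease_path_in_KG (KG : List (String × List (String × List String))) (drug : String) (disease : String) (out : Bool) : Prop := out = examine_existance_of_drug_disease_path_in_KG_alt KG drug disease
instance (KG : List (String × List (String × List String))) (drug : String) (disease : String) (out : Bool) : Decidable (Spec_examine_existance_of_drug_disease_path_in_KG KG drug disease out) := by unfold Spec_examine_existance_of_drug_disease_path_in_KG; infer_instance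

-- ===== CLAIM (what is proved, stated in full; the proofs are below) =====
def Claim_equal_examine_existance_of_drug_disease_path_in_KG : Prop := ∀ (KG : List (String × List (String × List String))) (drug : String) (disease : String), Dom_examine_existance_of_drug_disease_path_in_KG KG drug disease → Pre_examine_existance_of_drug_disease_path_in_KG KG drug disease → Spec_examine_existance_of_drug_disease_path_in_KG KG drug disease (examine_existance_of_drug_disease_path_in_KG KG drug disease)

-- ===== LEMMAS AND PROOFS =====

-- one KG-step: x is a key of KG and a listed object of m
def pvStp (KG : List (String × List (String × List String))) (m x : String) : Prop :=
  pvMem KG x = true ∧ x ∈ pvObjs KG m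

-- nodes reachable from the seed set Q in at most n KG-steps
def pvRL (KG : List (String × List (String × List String))) (Q : String → Prop) :
    Nat → String → Prop
  | 0, x => Q x
  | n + 1, x => pvRL KG Q n x ∨ ∃ m, pvRL KG Q n m ∧ pvStp KG m x

theorem pvRL_self (KG : List (String × List (String × List String))) (Q : String → Prop)
    (n : Nat) (x : String) (h : Q x) : pvRL KG Q n x := by
  induction n with
  | zero => exact h
  | succ n ih => exact Or.inl ih

-- peel a step off the BOTTOM of the iteration
theorem pvRL_shift (KG : List (String × List (String × List String))) (Q : String → Prop)
    (n : Nat) (x : String) :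
    pvRL KG Q (n + 1) x ↔ pvRL KG (fun y => Q y ∨ ∃ m, Q m ∧ pvStp KG m y) n x := by
  induction n generalizing x with
  | zero => exact Iff.rfl
  | succ n ih =>
    constructor
    · rintro (h | ⟨m, hm, hs⟩)
      · exact Or.inl ((ih x).1 h)
      · exact Or.inr ⟨m, (ih m).1 hm, hs⟩
    · rintro (h | ⟨m, hm, hs⟩)
      · exact Or.inl ((ih x).2 h)
      · exact Or.inr ⟨m, (ih m).2 hm, hs⟩

-- membership after the inner fold (over one candidate list cs)
theorem pvInner_mem (KG : List (String × List (String × List String))) (cs : List String) :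
    ∀ (acc : List String × PySem.Set String) (x : String),
    (x ∈ (cs.foldl (fun acc2 nb =>
      if pvMem KG nb && !(PySem.Set.contains acc2.2 nb) then
        (acc2.1 ++ [nb], PySem.Set.add acc2.2 nb)
      else acc2) acc).2 ↔ x ∈ acc.2 ∨ (x ∈ cs ∧ pvMem KG x = true)) ∧
    (x ∈ (cs.foldl (fun acc2 nb =>
      if pvMem KG nb && !(PySem.Set.contains acc2.2 nb) then
        (acc2.1 ++ [nb], PySem.Set.add acc2.2 nb)
      else acc2) acc).1 ↔ x ∈ acc.1 ∨ (x ∈ cs ∧ pvMem KG x = true ∧ x ∉ acc.2)) := by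
  induction cs with
  | nil => intro acc x; simp
  | cons c cs ih =>
    intro acc x
    simp only [List.foldl_cons]
    by_cases hc : pvMem KG c = true ∧ c ∉ acc.2
    · have hcond : (pvMem KG c && !(PySem.Set.contains acc.2 c)) = true := by
        simp [hc.1, hc.2]
      rw [if_pos hcond]
      obtain ⟨h2, h1⟩ := ih (acc.1 ++ [c], PySem.Set.add acc.2 c) x
      constructor
      · rw [h2]; simp only [PySem.Set.mem_add, List.mem_cons]
        constructor
        · rintro ((h | rfl) | h)
          · exact Or.inl h
          · exact Or.inr ⟨Or.inl rfl, hc.1⟩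
          · exact Or.inr ⟨Or.inr h.1, h.2⟩
        · rintro (h | ⟨(rfl | h), hm⟩)
          · exact Or.inl (Or.inl h)
          · exact Or.inl (Or.inr rfl)
          · exact Or.inr ⟨h, hm⟩
      · rw [h1]; simp only [PySem.Set.mem_add, List.mem_append, List.mem_cons,
          List.not_mem_nil, or_false]
        constructor
        · rintro ((h | rfl) | ⟨hcs, hm, hv⟩)
          · exact Or.inl h
          · exact Or.inr ⟨Or.inl rfl, hc.1, hc.2⟩
          · exact Or.inr ⟨Or.inr hcs, hm, fun hx => hv (Or.inl hx)⟩
        · rintro (h | ⟨(rfl | h), hm, hv⟩)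
          · exact Or.inl (Or.inl h)
          · exact Or.inl (Or.inr rfl)
          · by_cases hxc : x = c
            · exact Or.inl (Or.inr hxc)
            · refine Or.inr ⟨h, hm, ?_⟩
              rintro (hx | rfl)
              · exact hv hx
              · exact hxc rfl
    · have hcond : ¬ ((pvMem KG c && !(PySem.Set.contains acc.2 c)) = true) := by
        rcases Decidable.not_and_iff_or_not.1 hc with h | h
        · simp [Bool.eq_false_iff.2 h]
        · simp
          intro _; exact Decidable.not_not.1 h
      rw [if_neg hcond]
      obtain ⟨h2, h1⟩ := ih acc x
      have hcQ : x = c → pvMem KG x = true → x ∈ acc.2 := by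
        rintro rfl hm
        rcases Decidable.not_and_iff_or_not.1 hc with h | h
        · exact absurd hm h
        · exact Decidable.not_not.1 h
      constructor
      · rw [h2]; simp only [List.mem_cons]
        constructor
        · rintro (h | h)
          · exact Or.inl h
          · exact Or.inr ⟨Or.inr h.1, h.2⟩
        · rintro (h | ⟨(rfl | h), hm⟩)
          · exact Or.inl h
          · exact Or.inl (hcQ rfl hm)
          · exact Or.inr ⟨h, hm⟩
      · rw [h1]; simp only [List.mem_cons]
        constructor
        · rintro (h | ⟨hcs, hm, hv⟩)
          · exact Or.inl h
          · exact Or.inr ⟨Or.inr hcs, hm, hv⟩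
        · rintro (h | ⟨(rfl | h), hm, hv⟩)
          · exact Or.inl h
          · exact absurd (hcQ rfl hm) hv
          · exact Or.inr ⟨h, hm, hv⟩

-- membership after a whole expansion round
theorem pvExpand_mem (KG : List (String × List (String × List String)))
    (frontier : List String) :
    ∀ (acc : List String × PySem.Set String) (x : String),
    (x ∈ (frontier.foldl (fun acc n =>
      (pvObjs KG n).foldl (fun acc2 nb =>
        if pvMem KG nb && !(PySem.Set.contains acc2.2 nb) then
          (acc2.1 ++ [nb], PySem.Set.add acc2.2 nb)
        else acc2) acc) acc).2 ↔
      x ∈ acc.2 ∨ ((∃ m ∈ frontier, x ∈ pvObjs KG m) ∧ pvMem KG x = true)) ∧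
    (x ∈ (frontier.foldl (fun acc n =>
      (pvObjs KG n).foldl (fun acc2 nb =>
        if pvMem KG nb && !(PySem.Set.contains acc2.2 nb) then
          (acc2.1 ++ [nb], PySem.Set.add acc2.2 nb)
        else acc2) acc) acc).1 ↔
      x ∈ acc.1 ∨ ((∃ m ∈ frontier, x ∈ pvObjs KG m) ∧ pvMem KG x = true ∧ x ∉ acc.2)) := by
  induction frontier with
  | nil => intro acc x; simp
  | cons f fs ih =>
    intro acc x
    simp only [List.foldl_cons]
    obtain ⟨i2, i1⟩ := pvInner_mem KG (pvObjs KG f) acc x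
    obtain ⟨o2, o1⟩ := ih ((pvObjs KG f).foldl _ acc) x
    constructor
    · rw [o2, i2]; simp only [List.mem_cons]
      constructor
      · rintro ((h | ⟨ho, hm⟩) | ⟨⟨m, hmf, hx⟩, hm⟩)
        · exact Or.inl h
        · exact Or.inr ⟨⟨f, Or.inl rfl, ho⟩, hm⟩
        · exact Or.inr ⟨⟨m, Or.inr hmf, hx⟩, hm⟩
      · rintro (h | ⟨⟨m, (rfl | hmf), hx⟩, hm⟩)
        · exact Or.inl (Or.inl h)
        · exact Or.inl (Or.inr ⟨hx, hm⟩)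
        · exact Or.inr ⟨⟨m, hmf, hx⟩, hm⟩
    · rw [o1, i1, i2]; simp only [List.mem_cons]
      constructor
      · rintro ((h | ⟨ho, hm, hv⟩) | ⟨⟨m, hmf, hx⟩, hm, hv⟩)
        · exact Or.inl h
        · exact Or.inr ⟨⟨f, Or.inl rfl, ho⟩, hm, hv⟩
        · exact Or.inr ⟨⟨m, Or.inr hmf, hx⟩, hm, fun hx2 => hv (Or.inl hx2)⟩
      · rintro (h | ⟨⟨m, (rfl | hmf), hx⟩, hm, hv⟩)
        · exact Or.inl (Or.inl h)
        · exact Or.inl (Or.inr ⟨hx, hm, hv⟩)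
        · by_cases hin : x ∈ pvObjs KG f ∧ pvMem KG x = true
          · exact Or.inl (Or.inr ⟨hin.1, hin.2, hv⟩)
          · exact Or.inr ⟨⟨m, hmf, hx⟩, hm, by
              rintro (h2 | ⟨ho, _⟩); exact hv h2; exact hin ⟨ho, hm⟩⟩

-- unfold one BFS round
theorem pvBfs_succ (KG : List (String × List (String × List String))) (disease : String)
    (k : Nat) (F : List String) (V : PySem.Set String) :
    pvBfs KG disease (k + 1) F V =
      (F.any (fun n => (pvObjs KG n).contains disease) ||
        pvBfs KG disease k (pvExpand KG F V).1 (pvExpand KG F V).2) := by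
  simp only [pvBfs]
  cases h : F.any (fun n => (pvObjs KG n).contains disease) <;> simp

theorem pvAny_iff (KG : List (String × List (String × List String))) (disease : String)
    (F : List String) :
    (F.any (fun n => (pvObjs KG n).contains disease) = true) ↔
      ∃ x ∈ F, disease ∈ pvObjs KG x := by
  simp [List.any_eq_true]

-- BFS characterisation: with frontier = Q \ P and visited = Q (P = previously expanded layer),
-- k+1 further rounds report exactly the good nodes reachable in ≤ k more steps (outside P)
theorem pvBfs_char (KG : List (String × List (String × List String))) (disease : String) :
    ∀ (k : Nat) (P Q : String → Prop) (F : List String) (V : PySem.Set String),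
    (∀ x, P x → Q x) →
    (∀ x m, P m → pvStp KG m x → Q x) →
    (∀ x, x ∈ F ↔ Q x ∧ ¬ P x) →
    (∀ x, x ∈ V ↔ Q x) →
    (pvBfs KG disease (k + 1) F V = true ↔
      ∃ x, pvRL KG Q k x ∧ ¬ P x ∧ disease ∈ pvObjs KG x) := by
  intro k
  induction k with
  | zero =>
    intro P Q F V _ _ hF _
    rw [pvBfs_succ]
    simp only [pvBfs, Bool.or_false, pvAny_iff]
    constructor
    · rintro ⟨x, hxF, hd⟩
      obtain ⟨hQ, hP⟩ := (hF x).1 hxF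
      exact ⟨x, hQ, hP, hd⟩
    · rintro ⟨x, hQ, hP, hd⟩
      exact ⟨x, (hF x).2 ⟨hQ, hP⟩, hd⟩
  | succ k ih =>
    intro P Q F V hPQ hQs hF hV
    rw [pvBfs_succ]
    have hF' : ∀ x, x ∈ (pvExpand KG F V).1 ↔
        ((Q x ∨ ∃ m, Q m ∧ pvStp KG m x) ∧ ¬ Q x) := by
      intro x
      rw [show (pvExpand KG F V).1 = (F.foldl (fun acc n =>
        (pvObjs KG n).foldl (fun acc2 nb =>
          if pvMem KG nb && !(PySem.Set.contains acc2.2 nb) then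
            (acc2.1 ++ [nb], PySem.Set.add acc2.2 nb)
          else acc2) acc) ([], V)).1 from rfl,
        (pvExpand_mem KG F ([], V) x).2]
      constructor
      · rintro (h | ⟨⟨m, hmF, hx⟩, hm, hv⟩)
        · simp at h
        · obtain ⟨hQm, _⟩ := (hF m).1 hmF
          exact ⟨Or.inr ⟨m, hQm, hm, hx⟩, fun hQx => hv ((hV x).2 hQx)⟩
      · rintro ⟨(hQx | ⟨m, hQm, hm, hx⟩), hnQ⟩
        · exact absurd hQx hnQ
        · have hPm : ¬ P m := fun hPm => hnQ (hQs x m hPm ⟨hm, hx⟩)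
          exact Or.inr ⟨⟨m, (hF m).2 ⟨hQm, hPm⟩, hx⟩, hm, fun hv => hnQ ((hV x).1 hv)⟩
    have hV' : ∀ x, x ∈ (pvExpand KG F V).2 ↔ (Q x ∨ ∃ m, Q m ∧ pvStp KG m x) := by
      intro x
      rw [show (pvExpand KG F V).2 = (F.foldl (fun acc n =>
        (pvObjs KG n).foldl (fun acc2 nb =>
          if pvMem KG nb && !(PySem.Set.contains acc2.2 nb) then
            (acc2.1 ++ [nb], PySem.Set.add acc2.2 nb)
          else acc2) acc) ([], V)).2 from rfl,
        (pvExpand_mem KG F ([], V) x).1]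
      constructor
      · rintro (h | ⟨⟨m, hmF, hx⟩, hm⟩)
        · exact Or.inl ((hV x).1 h)
        · exact Or.inr ⟨m, ((hF m).1 hmF).1, hm, hx⟩
      · rintro (hQx | ⟨m, hQm, hm, hx⟩)
        · exact Or.inl ((hV x).2 hQx)
        · by_cases hPm : P m
          · exact Or.inl ((hV x).2 (hQs x m hPm ⟨hm, hx⟩))
          · exact Or.inr ⟨⟨m, (hF m).2 ⟨hQm, hPm⟩, hx⟩, hm⟩
    have hrec := ih Q (fun y => Q y ∨ ∃ m, Q m ∧ pvStp KG m y)
      (pvExpand KG F V).1 (pvExpand KG F V).2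
      (fun x h => Or.inl h) (fun x m hm hs => Or.inr ⟨m, hm, hs⟩) hF' hV'
    simp only [Bool.or_eq_true, pvAny_iff, hrec]
    constructor
    · rintro (⟨x, hxF, hd⟩ | ⟨x, hR, hnQ, hd⟩)
      · obtain ⟨hQ, hP⟩ := (hF x).1 hxF
        exact ⟨x, pvRL_self KG Q (k + 1) x hQ, hP, hd⟩
      · exact ⟨x, (pvRL_shift KG Q k x).2 hR, fun hP => hnQ (hPQ x hP), hd⟩
    · rintro ⟨x, hR, hP, hd⟩
      by_cases hQx : Q x
      · exact Or.inl ⟨x, (hF x).2 ⟨hQx, hP⟩, hd⟩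
      · exact Or.inr ⟨x, (pvRL_shift KG Q k x).1 hR, hQx, hd⟩

-- A characterisation: A reports a good node reachable from drug in ≤ 3 steps
theorem pvA_char (KG : List (String × List (String × List String))) (drug disease : String)
    (hd : pvMem KG drug = true) (hdis : pvMem KG disease = true) :
    (examine_existance_of_drug_disease_path_in_KG KG drug disease = true ↔
      ∃ x, pvRL KG (fun y => y = drug) 3 x ∧ disease ∈ pvObjs KG x) := by
  unfold examine_existance_of_drug_disease_path_in_KG
  rw [if_neg (by simp [hd, hdis])]
  simp only [Bool.if_true_left, Bool.if_false_right, Bool.and_true,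
    Bool.or_eq_true, List.any_eq_true, Bool.and_eq_true, List.contains_iff_mem,
    decide_eq_true_eq]
  constructor
  · rintro (h1 | ⟨e, he, hm, hdd⟩ | ⟨e1, he1, hm1, e2, he2, hm2, hdd⟩ |
      ⟨e1, he1, hm1, e2, he2, hm2, e3, he3, hm3, hdd⟩)
    · exact ⟨drug, pvRL_self _ _ 3 _ rfl, h1⟩
    · exact ⟨e, Or.inl (Or.inl (Or.inr ⟨drug, rfl, hm, he⟩)), hdd⟩
    · exact ⟨e2, Or.inl (Or.inr ⟨e1, Or.inr ⟨drug, rfl, hm1, he1⟩, hm2, he2⟩), hdd⟩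
    · exact ⟨e3, Or.inr ⟨e2, Or.inr ⟨e1, Or.inr ⟨drug, rfl, hm1, he1⟩, hm2, he2⟩,
        hm3, he3⟩, hdd⟩
  · rintro ⟨x, hR, hdd⟩
    rcases hR with ((hR | ⟨m, hm, hs⟩) | ⟨m, hm2, hs⟩) | ⟨m, hm3, hs⟩
    · rcases hR with rfl; exact Or.inl hdd
    · rcases hm with rfl; exact Or.inr (Or.inl ⟨x, hs.2, hs.1, hdd⟩)
    · rcases hm2 with rfl | ⟨m1, rfl, hs1⟩
      · exact Or.inr (Or.inl ⟨x, hs.2, hs.1, hdd⟩)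
      · exact Or.inr (Or.inr (Or.inl ⟨m, hs1.2, hs1.1, x, hs.2, hs.1, hdd⟩))
    · rcases hm3 with (rfl | ⟨m1, rfl, hs1⟩) | ⟨m2, hm2, hs2⟩
      · exact Or.inr (Or.inl ⟨x, hs.2, hs.1, hdd⟩)
      · exact Or.inr (Or.inr (Or.inl ⟨m, hs1.2, hs1.1, x, hs.2, hs.1, hdd⟩))
      · rcases hm2 with rfl | ⟨m1, rfl, hs1⟩
        · exact Or.inr (Or.inr (Or.inl ⟨m, hs2.2, hs2.1, x, hs.2, hs.1, hdd⟩))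
        · exact Or.inr (Or.inr (Or.inr ⟨m2, hs1.2, hs1.1, m, hs2.2, hs2.1,
            x, hs.2, hs.1, hdd⟩))

-- B characterisation: so does the BFS
theorem pvB_char (KG : List (String × List (String × List String))) (drug disease : String)
    (hd : pvMem KG drug = true) (hdis : pvMem KG disease = true) :
    (examine_existance_of_drug_disease_path_in_KG_alt KG drug disease = true ↔
      ∃ x, pvRL KG (fun y => y = drug) 3 x ∧ disease ∈ pvObjs KG x) := by
  unfold examine_existance_of_drug_disease_path_in_KG_alt
  rw [if_neg (by simp [hd, hdis])]
  have h := pvBfs_char KG disease 3 (fun _ => False) (fun y => y = drug) [drug]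
    (PySem.Set.ofList [drug]) (fun x h => h.elim) (fun x m h _ => h.elim)
    (by intro x; simp) (by intro x; simp [PySem.Set.mem_ofList])
  rw [show (4 : Nat) = 3 + 1 from rfl, h]
  constructor
  · rintro ⟨x, hR, _, hdd⟩; exact ⟨x, hR, hdd⟩
  · rintro ⟨x, hR, hdd⟩; exact ⟨x, hR, not_false, hdd⟩

-- ===== VERDICT (by name: the statement is the Claim_ definition above) =====
theorem examine_existance_of_drug_disease_path_in_KG_spec : Claim_equal_examine_existance_of_drug_disease_path_in_KG := by
  intro KG drug disease _ _
  unfold Spec_examine_existance_of_drug_disease_path_in_KG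
  by_cases hd : pvMem KG drug = true
  · by_cases hdis : pvMem KG disease = true
    · have hA := pvA_char KG drug disease hd hdis
      have hB := pvB_char KG drug disease hd hdis
      by_cases h : ∃ x, pvRL KG (fun y => y = drug) 3 x ∧ disease ∈ pvObjs KG x
      · rw [hA.2 h, hB.2 h]
      · rcases Bool.eq_false_or_eq_true (examine_existance_of_drug_disease_path_in_KG KG drug disease) with ht | hf
        · exact absurd (hA.1 ht) h
        · rcases Bool.eq_false_or_eq_true (examine_existance_of_drug_disease_path_in_KG_alt KG drug disease) with ht' | hf'
          · exact absurd (hB.1 ht') h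
          · rw [hf, hf']
    · unfold examine_existance_of_drug_disease_path_in_KG examine_existance_of_drug_disease_path_in_KG_alt
      rw [if_pos (by simp [hdis]), if_pos (by simp [hdis])]
  · unfold examine_existance_of_drug_disease_path_in_KG examine_existance_of_drug_disease_path_in_KG_alt
    rw [if_pos (by simp [hd]), if_pos (by simp [hd])]
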